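-- pv_equiv track=rewrite | github.com/adaptative/export-labeling-automation | labelforge/agents/chat.py | filter_patches
-- ===== SOURCE A (Python) =====
-- from typing import Any, Dict, Iterable, List, Mapping, Optional, Sequence
--
-- def filter_patches(
--     proposed: Mapping[str, Any],
--     allowlist: Iterable[str],
-- ) -> tuple[Dict[str, Any], List[str]]:
--     """Return ``(applied, dropped)`` after enforcing the allowlist.
--
--     ``allowlist`` is a flat list of dotted-key prefixes — e.g.
--     ``["country_of_origin", "fused.upc", "*"]``. Wildcard ``"*"`` allows
--     everything; otherwise a key is allowed if any prefix matches.
--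
--     Keys that fail the allowlist land in ``dropped`` so the caller can
--     surface them to the operator instead of silently swallowing them.
--     """
--     if not proposed:
--         return {}, []
--     allow = list(allowlist)
--     if "*" in allow:
--         return dict(proposed), []
--     applied: Dict[str, Any] = {}
--     dropped: List[str] = []
--     for key, value in proposed.items():
--         if any(key == prefix or key.startswith(prefix + ".") for prefix in allow):
--             applied[key] = value
--         else:
--             dropped.append(key)
--     return applied, dropped
-- ===== SOURCE B (Python) =====
-- def _dotted_prefixes(key):
--     """Every prefix of `key` ending just before a '.', then `key` itself."""
--     out = []
--     for i, ch in enumerate(key):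
--         if ch == '.':
--             out.append(key[:i])
--     out.append(key)
--     return out
--
--
-- def filter_patches(proposed, allowlist):
--     allow = set(allowlist)
--     if "*" in allow:
--         return dict(proposed), []
--     applied, dropped = {}, []
--     for key, value in proposed.items():
--         if any(p in allow for p in _dotted_prefixes(key)):
--             applied[key] = value
--         else:
--             dropped.append(key)
--     return applied, dropped
-- ===== Notes on version B (the rewrite author's own statement) =====
-- stated objective: faster
-- what changed: Instead of scanning the whole allowlist per key and building 'prefix + "."' for every (key, prefix) pair, B builds a set from the allowlist once and enumerates each key's own dotted prefixes (the key and every cut just before a '.'), testing each with an O(1) set lookup.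
import Mathlib
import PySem

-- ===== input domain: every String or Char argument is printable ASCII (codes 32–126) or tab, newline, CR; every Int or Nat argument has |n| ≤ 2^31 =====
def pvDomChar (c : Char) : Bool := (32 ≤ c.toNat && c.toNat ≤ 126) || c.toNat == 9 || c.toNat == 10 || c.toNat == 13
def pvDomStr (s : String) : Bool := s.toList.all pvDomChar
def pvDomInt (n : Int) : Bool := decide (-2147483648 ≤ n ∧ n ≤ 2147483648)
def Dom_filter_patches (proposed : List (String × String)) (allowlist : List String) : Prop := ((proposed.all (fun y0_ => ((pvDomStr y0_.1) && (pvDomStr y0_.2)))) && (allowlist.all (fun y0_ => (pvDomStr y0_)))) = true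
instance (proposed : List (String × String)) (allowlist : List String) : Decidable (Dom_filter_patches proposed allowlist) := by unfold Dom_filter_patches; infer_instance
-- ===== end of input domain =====

-- B replaces A's per-key scan over the whole allowlist (with a string concatenation per pair)
-- by a set built once from the allowlist plus an enumeration of the key's own dotted prefixes,
-- each looked up in the set: fewer, cheaper tests per key when the allowlist is large.

-- ===== PORT A =====
-- 'key.startswith(prefix + ".")' is ported on the character lists: String ++ is exactly
-- List.append of the code points, so 'PySem.Chars.startswith key.toList (pre.toList ++ ['.'])' is exact.
def filter_patches (proposed : List (String × String)) (allowlist : List String) : (List (String × String)) × List String :=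
  if proposed.isEmpty then ([], [])
  else
    let allow := allowlist
    if allow.contains "*" then ((PySem.Dict.ofList proposed).items, [])
    else
      let st := proposed.foldl
        (fun (st : PySem.Dict String String × List String) kv =>
          if allow.any (fun pre =>
              kv.1 == pre || PySem.Chars.startswith kv.1.toList (pre.toList ++ ['.']))
          then (st.1.insert kv.1 kv.2, st.2)
          else (st.1, st.2 ++ [kv.1]))
        (PySem.Dict.empty, [])
      (st.1.items, st.2)

-- ===== PORT B =====
-- port of Source B's _dotted_prefixes; key[:i] for an enumerate index i (always ≥ 0) is List.take i — exact
def dottedPrefixes (key : List Char) : List (List Char) :=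
  ((PySem.List.enumerate key).foldl
    (fun out p => if p.2 == '.' then out ++ [key.take p.1.toNat] else out)
    ([] : List (List Char))) ++ [key]

def filter_patches_alt (proposed : List (String × String)) (allowlist : List String) : (List (String × String)) × List String :=
  let allow : PySem.Set String := PySem.Set.ofList allowlist
  if PySem.Set.contains allow "*" then ((PySem.Dict.ofList proposed).items, [])
  else
    let st := proposed.foldl
      (fun (st : PySem.Dict String String × List String) kv =>
        if (dottedPrefixes kv.1.toList).any (fun c => PySem.Set.contains allow (String.ofList c))
        then (st.1.insert kv.1 kv.2, st.2)
        else (st.1, st.2 ++ [kv.1]))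
      (PySem.Dict.empty, [])
    (st.1.items, st.2)

-- ===== PRECONDITION & SPEC =====
def Spec_filter_patches (proposed : List (String × String)) (allowlist : List String) (out : (List (String × String)) × List String) : Prop := out = filter_patches_alt proposed allowlist
instance (proposed : List (String × String)) (allowlist : List String) (out : (List (String × String)) × List String) : Decidable (Spec_filter_patches proposed allowlist out) := by unfold Spec_filter_patches; infer_instance

-- ===== CLAIM (what is proved, stated in full; the proofs are below) =====
def Claim_equal_filter_patches : Prop := ∀ (proposed : List (String × String)) (allowlist : List String), Dom_filter_patches proposed allowlist → Spec_filter_patches proposed allowlist (filter_patches proposed allowlist)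

-- ===== LEMMAS AND PROOFS =====

-- 'c ++ "." is a prefix of k' ↔ c is the cut of k just before some '.'
lemma dot_prefix_iff (k c : List Char) :
    c ++ ['.'] <+: k ↔ ∃ j, ∃ _ : j < k.length, k[j] = '.' ∧ c = k.take j := by
  constructor
  · rintro ⟨t, ht⟩
    refine ⟨c.length, ?_, ?_, ?_⟩
    · subst ht; simp
    · subst ht
      simp
    · subst ht
      simp [List.take_left (l₁ := c) (l₂ := '.' :: t)]
  · rintro ⟨j, hj, hdot, rfl⟩
    refine ⟨k.drop (j + 1), ?_⟩
    have := List.drop_eq_getElem_cons hj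
    rw [hdot] at this
    calc k.take j ++ ['.'] ++ k.drop (j + 1)
        = k.take j ++ k.drop j := by rw [this]; simp
      _ = k := List.take_append_drop j k

lemma mem_dottedPrefixes (k c : List Char) :
    c ∈ dottedPrefixes k ↔ c ++ ['.'] <+: k ∨ c = k := by
  unfold dottedPrefixes
  rw [PySem.List.foldl_append_if (p := fun p : Int × Char => p.2 == '.')
        (f := fun p : Int × Char => k.take p.1.toNat)]
  simp only [List.nil_append, List.mem_append, List.mem_map, List.mem_filter,
    List.mem_singleton]
  rw [dot_prefix_iff]
  constructor
  · rintro (⟨p, ⟨hmem, hch⟩, rfl⟩ | rfl)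
    · rw [PySem.List.mem_enumerate_iff] at hmem
      obtain ⟨j, hj, hp⟩ := hmem
      rw [Prod.ext_iff] at hp
      obtain ⟨h1, h2⟩ := hp
      left
      refine ⟨j, hj, ?_, ?_⟩
      · have h2' : p.2 = k[j] := h2
        rw [← h2']; simpa using hch
      · have h1' : p.1 = (j : Int) := by simpa using h1
        simp [h1']
    · right; rfl
  · rintro (⟨j, hj, hdot, rfl⟩ | rfl)
    · left
      exact ⟨((j : Int), k[j]), ⟨(PySem.List.mem_enumerate_iff k 0 _).2 ⟨j, hj, by simp⟩,
        by simpa using hdot⟩, by simp⟩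
    · right; rfl

-- the two per-key allow tests agree
lemma pred_eq (allow : List String) (key : String) :
    (dottedPrefixes key.toList).any
        (fun c => PySem.Set.contains (PySem.Set.ofList allow) (String.ofList c))
      = allow.any (fun pre =>
          key == pre || PySem.Chars.startswith key.toList (pre.toList ++ ['.'])) := by
  rw [Bool.eq_iff_iff]
  simp only [List.any_eq_true, PySem.Set.contains_iff, PySem.Set.mem_ofList,
    Bool.or_eq_true, beq_iff_eq, PySem.Chars.startswith_iff]
  constructor
  · rintro ⟨c, hc, hmem⟩
    rw [mem_dottedPrefixes] at hc
    refine ⟨String.ofList c, hmem, ?_⟩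
    rcases hc with h | rfl
    · right; simpa using h
    · left; apply String.toList_inj.mp; simp
  · rintro ⟨pre, hmem, h | h⟩
    · exact ⟨key.toList, (mem_dottedPrefixes _ _).2 (Or.inr rfl), by simpa [h] using hmem⟩
    · exact ⟨pre.toList, (mem_dottedPrefixes _ _).2 (Or.inl h), by simpa using hmem⟩

-- membership of "*" tested on the list and on the set built from it agree
lemma star_eq (allow : List String) :
    PySem.Set.contains (PySem.Set.ofList allow) "*" = allow.contains "*" := by
  rw [Bool.eq_iff_iff, PySem.Set.contains_iff, PySem.Set.mem_ofList, List.contains_iff_mem]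

-- ===== VERDICT (by name: the statement is the Claim_ definition above) =====
theorem filter_patches_spec : Claim_equal_filter_patches := by
  intro proposed allowlist _
  unfold Spec_filter_patches filter_patches filter_patches_alt
  dsimp only
  rw [star_eq]
  simp only [pred_eq]
  cases hstar : allowlist.contains "*"
  · simp only [Bool.false_eq_true, if_false]
    cases proposed with
    | nil => rfl
    | cons hd tl => simp
  · simp only [if_true]
    cases proposed with
    | nil => rfl
    | cons hd tl => simp
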